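-- pv_equiv track=rewrite | github.com/wilmurillo-ai/Design-Assistant | .skills/openclaw-skills/skills/ntaffffff/openclaw-enhancement-skill/permissions/__init__.py | _check_path_pattern
-- ===== SOURCE A (Python) =====
-- from typing import Dict, List, Optional, Any, Set
--
-- def _check_path_pattern(path: str, patterns: List[str]) -> bool:
--     """检查路径模式"""
--     for pattern in patterns:
--         if pattern == "*":
--             return True
--         if pattern.endswith("*"):
--             prefix = pattern[:-1]
--             if path.startswith(prefix):
--                 return True
--         elif pattern in path:
--             return True
--     return False
-- ===== SOURCE B (Python) =====
-- from typing import Dict, List, Optional, Any, Set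
--
-- def _check_path_pattern(path: str, patterns: List[str]) -> bool:
--     """检查路径模式"""
--     prefixes = []
--     substrings = []
--     for pattern in patterns:
--         if pattern.endswith("*"):
--             prefixes.append(pattern[:-1])
--         else:
--             substrings.append(pattern)
--     return path.startswith(tuple(prefixes)) or any(s in path for s in substrings)
-- ===== Notes on version B (the rewrite author's own statement) =====
-- stated objective: alternative
-- what changed: Replaces the branchy per-pattern early-return scan by a partition pass splitting patterns into stripped wildcard prefixes and plain substrings, then one startswith-tuple test plus one any-substring test.
import Mathlib
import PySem

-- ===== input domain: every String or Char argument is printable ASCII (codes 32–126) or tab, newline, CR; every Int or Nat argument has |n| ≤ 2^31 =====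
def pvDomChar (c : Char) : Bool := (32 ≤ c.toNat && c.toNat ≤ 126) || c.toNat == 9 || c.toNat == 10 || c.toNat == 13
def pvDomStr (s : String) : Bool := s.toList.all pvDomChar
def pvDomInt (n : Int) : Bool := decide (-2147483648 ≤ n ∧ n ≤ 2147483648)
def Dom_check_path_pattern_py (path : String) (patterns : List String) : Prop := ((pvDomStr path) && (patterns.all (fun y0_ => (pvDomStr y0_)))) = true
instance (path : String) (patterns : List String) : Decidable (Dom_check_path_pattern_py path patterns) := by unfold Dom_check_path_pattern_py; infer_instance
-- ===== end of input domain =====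

-- B partitions patterns into stripped wildcard prefixes and plain substrings, then runs two specialized passes; same results, different decomposition.

-- ===== PORT A =====
def check_path_pattern_py (path : String) (patterns : List String) : Bool :=
  match patterns with
  | [] => false
  | pattern :: rest =>
    if pattern == "*" then true
    else if PySem.Str.endswith pattern "*" then
      let pref := PySem.Str.slice pattern none (some (-1))
      if PySem.Str.startswith path pref then true
      else check_path_pattern_py path rest
    else if PySem.Str.isIn pattern path then true
    else check_path_pattern_py path rest

-- ===== PORT B =====
def check_path_pattern_py_alt (path : String) (patterns : List String) : Bool :=
  let acc := patterns.foldl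
    (fun (acc : List String × List String) pattern =>
      if PySem.Str.endswith pattern "*" then
        (acc.1 ++ [PySem.Str.slice pattern none (some (-1))], acc.2)
      else (acc.1, acc.2 ++ [pattern]))
    ([], [])
  acc.1.any (fun p => PySem.Str.startswith path p) || acc.2.any (fun s => PySem.Str.isIn s path)

-- ===== PRECONDITION & SPEC =====
def Spec_check_path_pattern_py (path : String) (patterns : List String) (out : Bool) : Prop := out = check_path_pattern_py_alt path patterns
instance (path : String) (patterns : List String) (out : Bool) : Decidable (Spec_check_path_pattern_py path patterns out) := by unfold Spec_check_path_pattern_py; infer_instance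

-- ===== CLAIM (what is proved, stated in full; the proofs are below) =====
def Claim_equal_check_path_pattern_py : Prop := ∀ (path : String) (patterns : List String), Dom_check_path_pattern_py path patterns → Spec_check_path_pattern_py path patterns (check_path_pattern_py path patterns)

-- ===== LEMMAS AND PROOFS =====

-- the per-pattern match predicate both sides compute
def pvMatch (path pattern : String) : Bool :=
  if PySem.Str.endswith pattern "*" then
    PySem.Str.startswith path (PySem.Str.slice pattern none (some (-1)))
  else PySem.Str.isIn pattern path

theorem startswith_strip_star (path : String) :
    PySem.Str.startswith path (PySem.Str.slice "*" none (some (-1))) = true := by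
  have h : PySem.Str.slice "*" none (some (-1)) = "" := by decide
  rw [h]
  simp [PySem.Str.startswith_eq, PySem.Chars.startswith_iff]

theorem A_eq_any (path : String) (patterns : List String) :
    check_path_pattern_py path patterns = patterns.any (pvMatch path) := by
  induction patterns with
  | nil => rfl
  | cons p rest ih =>
    by_cases hstar : p = "*"
    · subst hstar
      have hm : pvMatch path "*" = true := by
        unfold pvMatch
        rw [if_pos (by decide)]
        exact startswith_strip_star path
      simp [check_path_pattern_py, List.any_cons, hm]
    · simp only [check_path_pattern_py, List.any_cons, pvMatch]
      rw [if_neg (by simpa using hstar)]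
      split_ifs <;> simp_all

theorem B_fold_inv (path : String) (patterns ps ss : List String) :
    (((patterns.foldl
        (fun (acc : List String × List String) pattern =>
          if PySem.Str.endswith pattern "*" then
            (acc.1 ++ [PySem.Str.slice pattern none (some (-1))], acc.2)
          else (acc.1, acc.2 ++ [pattern]))
        (ps, ss)).1.any (fun p => PySem.Str.startswith path p))
      || ((patterns.foldl
        (fun (acc : List String × List String) pattern =>
          if PySem.Str.endswith pattern "*" then
            (acc.1 ++ [PySem.Str.slice pattern none (some (-1))], acc.2)
          else (acc.1, acc.2 ++ [pattern]))
        (ps, ss)).2.any (fun s => PySem.Str.isIn s path)))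
    = ((ps.any (fun p => PySem.Str.startswith path p)
        || ss.any (fun s => PySem.Str.isIn s path))
       || patterns.any (pvMatch path)) := by
  induction patterns generalizing ps ss with
  | nil => simp
  | cons p rest ih =>
    simp only [List.foldl_cons, List.any_cons]
    split_ifs with h
    · rw [ih]
      simp only [pvMatch]
      rw [if_pos h]
      simp [List.any_append, Bool.or_assoc, Bool.or_comm, Bool.or_left_comm]
    · rw [ih]
      simp only [pvMatch]
      rw [if_neg h]
      simp [Bool.or_assoc, Bool.or_comm]

-- ===== VERDICT (by name: the statement is the Claim_ definition above) =====
theorem check_path_pattern_py_spec : Claim_equal_check_path_pattern_py := by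
  intro path patterns _
  unfold Spec_check_path_pattern_py check_path_pattern_py_alt
  rw [A_eq_any]
  have h := B_fold_inv path patterns [] []
  simpa using h.symm
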